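-- pv_equiv track=rewrite | github.com/sangmichaelxie/pretraining_analysis | src/generate_data.py | letter_generator
-- ===== SOURCE A (Python) =====
-- from string import ascii_lowercase
-- from itertools import permutations
--
-- def letter_generator(num):
--     counter = 0
--     for i in range(1, len(ascii_lowercase)):
--         for perm in permutations(ascii_lowercase, i):
--             yield ''.join(perm)
--             counter += 1
--             if counter >= num:
--                 return
-- ===== SOURCE B (Python) =====
-- from string import ascii_lowercase
--
-- def letter_generator(num):
--     # Hand-rolled permutation enumeration instead of itertools.permutations:
--     # pick each remaining letter in its original (alphabetical) order, recurse
--     # with it removed; this is exactly itertools' index-lexicographic order.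
--     def perms(prefix, avail, k):
--         if k == 0:
--             yield ''.join(prefix)
--             return
--         for idx, ch in enumerate(avail):
--             yield from perms(prefix + [ch], avail[:idx] + avail[idx + 1:], k - 1)
--
--     emitted = 0
--     for k in range(1, len(ascii_lowercase)):
--         for s in perms([], list(ascii_lowercase), k):
--             yield s
--             emitted += 1
--             if emitted >= num:
--                 return
-- ===== Notes on version B (the rewrite author's own statement) =====
-- stated objective: alternative
-- what changed: B replaces the itertools.permutations library call by its own recursive enumeration on (prefix, remaining letters), picking each remaining letter in original order so the index-lexicographic emission order and the yield-then-check num cutoff are reproduced exactly.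
import Mathlib
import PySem

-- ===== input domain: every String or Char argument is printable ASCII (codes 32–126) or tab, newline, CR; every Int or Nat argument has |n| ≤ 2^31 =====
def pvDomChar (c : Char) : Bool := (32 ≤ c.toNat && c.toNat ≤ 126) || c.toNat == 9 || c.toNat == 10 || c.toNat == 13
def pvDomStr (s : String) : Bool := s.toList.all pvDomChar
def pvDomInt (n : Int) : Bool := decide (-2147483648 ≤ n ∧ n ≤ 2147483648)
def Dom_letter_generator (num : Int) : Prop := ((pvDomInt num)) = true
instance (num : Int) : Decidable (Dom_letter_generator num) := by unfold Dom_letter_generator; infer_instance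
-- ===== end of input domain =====

-- B re-implements the itertools.permutations call by its own recursion on (prefix, remaining
-- letters) in the same emission order (objective: alternative, same cost); both ports return the
-- list of all values the Python generator yields.

-- ===== PORT A =====
-- module constant: string.ascii_lowercase
def pvAsciiLower : List Char := "abcdefghijklmnopqrstuvwxyz".toList

-- A-side helper: each element of the pool paired with the pool minus that element, in pool order.
-- pvPermsA transcribes itertools.permutations(pool, k): it emits the documented order (tuples in
-- lexicographic order of the chosen index sequences: first position 0, then permutations of the
-- rest, …) — exact for itertools' emission order.
def pvPicksA : List Char → List (Char × List Char)
  | [] => []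
  | c :: rest => (c, rest) :: (pvPicksA rest).map (fun p => (p.1, c :: p.2))

def pvPermsA : Nat → List Char → List (List Char)
  | 0, _ => [[]]
  | k + 1, pool => (pvPicksA pool).flatMap (fun p => (pvPermsA k p.2).map (p.1 :: ·))

-- the inner 'for perm in permutations(...)' loop: yield ''.join(perm); counter += 1;
-- if counter >= num: return.  Returns (yields so far, counter, stopped-by-return?).
def pvInnerA (num : Int) : List (List Char) → Int → List String → (List String × Int × Bool)
  | [], counter, acc => (acc, counter, false)
  | perm :: rest, counter, acc =>
    let acc' := acc ++ [String.mk perm]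
    let counter' := counter + 1
    if counter' ≥ num then (acc', counter', true)
    else pvInnerA num rest counter' acc'

-- the outer 'for i in range(1, len(ascii_lowercase))' loop
def pvOuterA (num : Int) : List Nat → Int → List String → List String
  | [], _, acc => acc
  | i :: is, counter, acc =>
    match pvInnerA num (pvPermsA i pvAsciiLower) counter acc with
    | (acc', counter', stopped) => if stopped then acc' else pvOuterA num is counter' acc'

def letter_generator (num : Int) : List String :=
  pvOuterA num (List.range' 1 25) 0 []   -- range(1, 26)

-- ===== PORT B =====
-- Source B's perms(prefix, avail, k): for idx, ch in enumerate(avail):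
--   recurse on (pre + [ch], avail[:idx] + avail[idx+1:], k-1); at k == 0 yield ''.join(prefix).
-- enumerate(avail) is List.zipIdx (pairs are (value, index)).
def pvPermsB (pre : List Char) (avail : List Char) : Nat → List String
  | 0 => [String.mk pre]
  | k + 1 =>
    avail.zipIdx.flatMap (fun p =>
      pvPermsB (pre ++ [p.1]) (avail.take p.2 ++ avail.drop (p.2 + 1)) k)

-- Source B's two nested generator loops rendered as one stream machine over
-- (pending strings of the current length, remaining lengths, emitted count):
-- an empty pending loads the next length's block; otherwise emit one string,
-- stop when the count reaches num.
def pvGenB (num : Int) : List String → List Nat → Int → List String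
  | [], [], _ => []
  | [], k :: ks, emitted => pvGenB num (pvPermsB [] pvAsciiLower k) ks emitted
  | s :: rest, ks, emitted =>
    s :: (if emitted + 1 ≥ num then [] else pvGenB num rest ks (emitted + 1))
  termination_by pending ks _ => (ks.length, pending.length)
  decreasing_by all_goals simp_wf; omega

def letter_generator_alt (num : Int) : List String :=
  pvGenB num [] (List.range' 1 25) 0

-- ===== PRECONDITION & SPEC =====
def Spec_letter_generator (num : Int) (out : List String) : Prop := out = letter_generator_alt num
instance (num : Int) (out : List String) : Decidable (Spec_letter_generator num out) := by unfold Spec_letter_generator; infer_instance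

-- ===== CLAIM (what is proved, stated in full; the proofs are below) =====
def Claim_equal_letter_generator : Prop := ∀ (num : Int), Dom_letter_generator num → Spec_letter_generator num (letter_generator num)

-- ===== LEMMAS AND PROOFS =====

-- A's continuation: finish the current block with pvInnerA, then (unless the return fired)
-- continue with the remaining lengths.
def pvContA (num : Int) (pending : List (List Char)) (ks : List Nat) (counter : Int)
    (acc : List String) : List String :=
  match pvInnerA num pending counter acc with
  | (acc', counter', stopped) => if stopped then acc' else pvOuterA num ks counter' acc'

theorem pv_zipIdx_shift {α : Type} (l : List α) (n : Nat) :
    l.zipIdx n = l.zipIdx.map (fun p => (p.1, p.2 + n)) := by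
  induction l generalizing n with
  | nil => simp
  | cons a l ih =>
    simp only [List.zipIdx_cons, List.map_cons, Nat.zero_add]
    refine congrArg (List.cons (a, n)) ?_
    rw [ih (n + 1), ih 1, List.map_map]
    refine List.map_congr_left ?_
    intro p _
    simp only [Function.comp_def, Prod.mk.injEq, true_and]
    omega

theorem pv_picksA_eq (l : List Char) :
    pvPicksA l = l.zipIdx.map (fun p => (p.1, l.take p.2 ++ l.drop (p.2 + 1))) := by
  induction l with
  | nil => simp [pvPicksA]
  | cons c rest ih =>
    simp only [pvPicksA, ih, List.zipIdx_cons, List.map_cons, List.map_map]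
    refine congrArg₂ List.cons (by simp) ?_
    rw [pv_zipIdx_shift rest 1, List.map_map]
    refine List.map_congr_left ?_
    intro p _
    simp [List.take_succ_cons, List.drop_succ_cons]

theorem pv_perms_eq (k : Nat) : ∀ (pre avail : List Char),
    pvPermsB pre avail k = (pvPermsA k avail).map (fun t => String.mk (pre ++ t)) := by
  induction k with
  | zero => intro pre avail; simp [pvPermsB, pvPermsA]
  | succ k ih =>
    intro pre avail
    simp only [pvPermsB, pvPermsA, pv_picksA_eq, List.map_flatMap, List.flatMap_map]
    refine List.flatMap_congr ?_ 
    intro p _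
    rw [ih]
    simp [List.map_map, Function.comp_def, List.append_assoc]

theorem pv_bridge (num : Int) : ∀ (ks : List Nat) (pending : List (List Char)) (counter : Int)
    (acc : List String),
    pvContA num pending ks counter acc = acc ++ pvGenB num (pending.map String.mk) ks counter := by
  intro ks
  induction ks with
  | nil =>
    intro pending
    induction pending with
    | nil => intro counter acc; simp [pvContA, pvInnerA, pvOuterA, pvGenB]
    | cons s rest ih =>
      intro counter acc
      simp only [pvContA, pvInnerA, List.map_cons]
      by_cases h : counter + 1 ≥ num
      · rw [if_pos h]
        rw [pvGenB, if_pos h]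
        simp
      · rw [if_neg h]
        rw [pvGenB, if_neg h]
        have := ih (counter + 1) (acc ++ [String.mk s])
        simp only [pvContA] at this
        rw [this]
        simp
  | cons k ks ihks =>
    intro pending
    induction pending with
    | nil =>
      intro counter acc
      have h1 : pvPermsB [] pvAsciiLower k = (pvPermsA k pvAsciiLower).map String.mk := by
        rw [pv_perms_eq]; simp
      have hks := ihks (pvPermsA k pvAsciiLower) counter acc
      simp only [List.map_nil]
      rw [pvGenB, h1, ← hks]
      simp only [pvContA, pvInnerA, Bool.false_eq_true, if_false]
      rw [pvOuterA]
    | cons s rest ih =>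
      intro counter acc
      simp only [pvContA, pvInnerA, List.map_cons]
      by_cases h : counter + 1 ≥ num
      · rw [if_pos h]
        rw [pvGenB, if_pos h]
        simp
      · rw [if_neg h]
        rw [pvGenB, if_neg h]
        have := ih (counter + 1) (acc ++ [String.mk s])
        simp only [pvContA] at this
        rw [this]
        simp

-- ===== VERDICT (by name: the statement is the Claim_ definition above) =====
theorem letter_generator_spec : Claim_equal_letter_generator := by
  intro num _
  unfold Spec_letter_generator letter_generator letter_generator_alt
  have := pv_bridge num (List.range' 1 25) [] 0 []
  simpa [pvContA, pvInnerA] using this
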